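-- pv_equiv track=rewrite | github.com/EVanwormhoudt/QuantumTSP | solverGTSP.py | verify_solution_gtsp
-- ===== SOURCE A (Python) =====
-- def verify_solution_gtsp(solution, matrix, clusters):
--     solution = [k for k, v in solution.items() if v == 1]
--     solution = [(int(x.split('_')[1]),int(x.split('_')[2])) for x in solution]
--     solution_sorted = list(sorted(solution, key=lambda x: x[1]))
--     solution_sorted = [x[0] for x in solution_sorted]
--
--     for c in clusters.values():
--         count = 0
--         for i in c:
--             if i in solution_sorted:
--                 count += 1
--         if count != 1:
--             return False
--     if len(solution) != len(clusters.keys()):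
--         return False
--     return True
-- ===== SOURCE B (Python) =====
-- def verify_solution_gtsp(solution, matrix, clusters):
--     sel = [k for k, v in solution.items() if v == 1]
--     nodes = {int(k.split('_')[1]) for k in sel}
--     index = {}
--     for key, c in clusters.items():
--         for i in c:
--             index.setdefault(i, []).append(key)
--     counts = {key: 0 for key in clusters}
--     for val in nodes:
--         for key in index.get(val, []):
--             counts[key] += 1
--     return len(sel) == len(clusters) and all(c == 1 for c in counts.values())
-- ===== Notes on version B (the rewrite author's own statement) =====
-- stated objective: alternative
-- what changed: A sorts the parsed selection and, for every cluster element, scans the selected-node list; B builds the set of selected nodes and an inverted index from node value to cluster keys and folds it into per-cluster counts, dropping the sort (membership never depended on it).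
import Mathlib
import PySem

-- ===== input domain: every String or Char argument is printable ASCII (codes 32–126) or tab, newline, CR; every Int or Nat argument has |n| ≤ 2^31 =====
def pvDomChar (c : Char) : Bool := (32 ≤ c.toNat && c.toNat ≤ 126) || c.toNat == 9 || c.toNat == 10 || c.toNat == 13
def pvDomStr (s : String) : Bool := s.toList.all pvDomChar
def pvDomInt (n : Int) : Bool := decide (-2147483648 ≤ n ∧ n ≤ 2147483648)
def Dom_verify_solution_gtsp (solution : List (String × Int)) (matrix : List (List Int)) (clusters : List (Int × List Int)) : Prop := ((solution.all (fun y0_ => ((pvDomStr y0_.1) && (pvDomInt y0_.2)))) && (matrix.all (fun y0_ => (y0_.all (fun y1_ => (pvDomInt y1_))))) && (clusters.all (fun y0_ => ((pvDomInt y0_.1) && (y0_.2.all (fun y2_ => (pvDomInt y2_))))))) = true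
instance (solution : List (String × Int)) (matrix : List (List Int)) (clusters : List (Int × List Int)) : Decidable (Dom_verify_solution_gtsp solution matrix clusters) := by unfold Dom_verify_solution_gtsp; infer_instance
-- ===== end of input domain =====

-- B replaces A's sort plus per-cluster membership scans of the selected list by a selected-node set
-- and an inverted index (value -> cluster keys) folded into per-cluster counts (objective: alternative).
-- Return-value equivalence; neither program mutates its arguments.

-- shared helper: int(x.split('_')[i]) — none exactly where Python raises (IndexError/ValueError)
def pvSplitAt? (x : String) (i : Int) : Option Int :=
  match PySem.Str.split? x "_" with
  | none => none
  | some parts =>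
    match PySem.List.pyGet? parts i with
    | none => none
    | some s => PySem.Int.ofStr? s

-- (int(x.split('_')[1]), int(x.split('_')[2])), as A computes per selected key
def pvParse? (x : String) : Option (Int × Int) :=
  match pvSplitAt? x 1 with
  | none => none
  | some a =>
    match pvSplitAt? x 2 with
    | none => none
    | some b => some (a, b)

-- ===== PORT A =====
-- 'count = 0; for i in c: if i in solution_sorted: count += 1'
def pvCountA (ss : List Int) (c : List Int) : Int :=
  c.foldl (fun cnt i => if ss.contains i then cnt + 1 else cnt) 0

-- 'for c in clusters.values(): … ; if count != 1: return False' (early return)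
def pvLoopA (ss : List Int) : List (List Int) → Bool
  | [] => true
  | c :: rest => if pvCountA ss c ≠ 1 then false else pvLoopA ss rest

def verify_solution_gtsp (solution : List (String × Int)) (matrix : List (List Int)) (clusters : List (Int × List Int)) : Bool :=
  let cd := PySem.Dict.ofList clusters
  let sel := ((PySem.Dict.ofList solution).items.filter (fun p => p.2 == 1)).map (fun p => p.1)
  match sel.mapM pvParse? with
  | none => false  -- Python raises here (ValueError/IndexError); excluded by Pre_
  | some parsed =>
    let ss := (PySem.List.sorted parsed (fun p => p.2) false).map (fun p => p.1)
    if pvLoopA ss cd.values then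
      if parsed.length ≠ cd.keys.length then false else true
    else false

-- ===== PORT B =====
def verify_solution_gtsp_alt (solution : List (String × Int)) (matrix : List (List Int)) (clusters : List (Int × List Int)) : Bool :=
  let cd := PySem.Dict.ofList clusters
  let sel := ((PySem.Dict.ofList solution).items.filter (fun p => p.2 == 1)).map (fun p => p.1)
  match sel.mapM (fun x => pvSplitAt? x 1) with
  | none => false  -- Python raises here; excluded by Pre_
  | some firsts =>
    let nodes : PySem.Set Int := PySem.Set.ofList firsts
    -- index: value -> list of cluster keys containing it (with multiplicity)
    let idx : PySem.Dict Int (List Int) :=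
      cd.items.foldl (fun d p => p.2.foldl (fun d i => d.modify i [] (fun l => l ++ [p.1])) d) PySem.Dict.empty
    let counts0 : PySem.Dict Int Int := cd.keys.foldl (fun d k => d.insert k (0 : Int)) PySem.Dict.empty
    let counts := nodes.foldl (fun d v => (idx.getD v []).foldl (fun d k => d.modify k 0 (fun n => n + 1)) d) counts0
    decide (sel.length = cd.keys.length) && counts.values.all (fun c => c == 1)

-- ===== PRECONDITION & SPEC =====
-- Pre_ excludes exactly the inputs on which A raises: some selected key (dict value 1) whose
-- '_'-split has no parts [1]/[2] or whose parts are not int()-parseable.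
def Pre_verify_solution_gtsp (solution : List (String × Int)) (matrix : List (List Int)) (clusters : List (Int × List Int)) : Prop :=
  ∀ p ∈ (PySem.Dict.ofList solution).items, p.2 = 1 → (pvParse? p.1).isSome = true
instance (solution : List (String × Int)) (matrix : List (List Int)) (clusters : List (Int × List Int)) : Decidable (Pre_verify_solution_gtsp solution matrix clusters) := by unfold Pre_verify_solution_gtsp; infer_instance
def pvWitness_verify_solution_gtsp : (List (String × Int)) × List (List Int) × (List (Int × List Int)) :=
  ([("x_1_2", 1)], [], [(5, [1])])

def Spec_verify_solution_gtsp (solution : List (String × Int)) (matrix : List (List Int)) (clusters : List (Int × List Int)) (out : Bool) : Prop := out = verify_solution_gtsp_alt solution matrix clusters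
instance (solution : List (String × Int)) (matrix : List (List Int)) (clusters : List (Int × List Int)) (out : Bool) : Decidable (Spec_verify_solution_gtsp solution matrix clusters out) := by unfold Spec_verify_solution_gtsp; infer_instance

-- ===== CLAIM (what is proved, stated in full; the proofs are below) =====
def Claim_equal_verify_solution_gtsp : Prop := ∀ (solution : List (String × Int)) (matrix : List (List Int)) (clusters : List (Int × List Int)), Dom_verify_solution_gtsp solution matrix clusters → Pre_verify_solution_gtsp solution matrix clusters → Spec_verify_solution_gtsp solution matrix clusters (verify_solution_gtsp solution matrix clusters)
-- ===== LEMMAS AND PROOFS =====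

-- mapM over Option succeeds when every element succeeds
theorem pvMapM_isSome {α β : Type} (f : α → Option β) :
    ∀ (l : List α), (∀ x ∈ l, (f x).isSome = true) → ∃ r, l.mapM f = some r := by
  intro l h
  induction l with
  | nil => exact ⟨[], rfl⟩
  | cons a t ih =>
    obtain ⟨r, hr⟩ := ih (fun x hx => h x (List.mem_cons_of_mem _ hx))
    obtain ⟨b, hb⟩ := Option.isSome_iff_exists.mp (h a (List.mem_cons_self))
    exact ⟨b :: r, by simp [List.mapM_cons, hb, hr]⟩

theorem pvMapM_fst : ∀ (l : List String) (parsed : List (Int × Int)),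
    l.mapM pvParse? = some parsed →
    l.mapM (fun x => pvSplitAt? x 1) = some (parsed.map Prod.fst) ∧ parsed.length = l.length := by
  intro l
  induction l with
  | nil => intro parsed h; simp_all [List.mapM_nil]
  | cons a t ih =>
    intro parsed h
    rw [List.mapM_cons] at h
    cases hp : pvParse? a with
    | none => simp [hp] at h
    | some ab =>
      simp only [hp] at h
      cases ht : t.mapM pvParse? with
      | none => simp [ht] at h
      | some rest =>
        rw [ht] at h
        have h' : ab :: rest = parsed := by
          simpa [Option.bind, pure] using h
        obtain ⟨h1, h2⟩ := ih rest ht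
        have ha1 : pvSplitAt? a 1 = some ab.1 := by
          unfold pvParse? at hp
          cases h1' : pvSplitAt? a 1 with
          | none => simp [h1'] at hp
          | some x =>
            rw [h1'] at hp
            cases h2' : pvSplitAt? a 2 with
            | none => simp [h2'] at hp
            | some y => rw [h2'] at hp; simp at hp; simp [← hp]
        subst h'
        constructor
        · rw [List.mapM_cons, ha1, h1]; rfl
        · simp [h2]

theorem pvLoopA_eq_all (ss : List Int) : ∀ (vals : List (List Int)),
    pvLoopA ss vals = vals.all (fun c => pvCountA ss c == 1) := by
  intro vals
  induction vals with
  | nil => rfl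
  | cons c rest ih =>
    rw [pvLoopA, List.all_cons, ih]
    by_cases h : pvCountA ss c = 1 <;> simp [h]


theorem pvAllCongr {α : Type} (l : List α) (p q : α → Bool) (h : ∀ x ∈ l, p x = q x) :
    l.all p = l.all q := by
  induction l with
  | nil => rfl
  | cons a t ih =>
    rw [List.all_cons, List.all_cons, h a List.mem_cons_self,
      ih (fun x hx => h x (List.mem_cons_of_mem _ hx))]

theorem pvIdxFlat (l : List (Int × List Int)) (d : PySem.Dict Int (List Int)) :
    l.foldl (fun d p => p.2.foldl (fun d i => d.modify i [] (fun s => s ++ [p.1])) d) d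
      = (l.flatMap (fun p => p.2.map (fun i => (i, p.1)))).foldl
          (fun d q => d.modify q.1 [] (fun s => s ++ [q.2])) d := by
  induction l generalizing d with
  | nil => rfl
  | cons a t ih =>
    simp only [List.foldl_cons, List.flatMap_cons, List.foldl_append, List.foldl_map]
    exact ih _

theorem pvCntFlat (ns : List Int) (idx : PySem.Dict Int (List Int)) (d : PySem.Dict Int Int) :
    ns.foldl (fun d v => (idx.getD v []).foldl (fun d k => d.modify k 0 (fun n => n + 1)) d) d
      = (ns.flatMap (fun v => idx.getD v [])).foldl (fun d k => d.modify k 0 (fun n => n + 1)) d := by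
  induction ns generalizing d with
  | nil => rfl
  | cons a t ih =>
    simp only [List.foldl_cons, List.flatMap_cons, List.foldl_append]
    exact ih _

theorem pvSumPick (k : Int) (f : List Int → Nat) :
    ∀ (items : List (Int × List Int)) (c : List Int), (items.map Prod.fst).Nodup → (k, c) ∈ items →
    (items.map (fun p => if p.1 = k then f p.2 else 0)).sum = f c := by
  intro items
  induction items with
  | nil => intro c _ h; cases h
  | cons a t ih =>
    intro c hnd hmem
    simp only [List.map_cons, List.nodup_cons, List.mem_map] at hnd
    simp only [List.map_cons, List.sum_cons]
    rcases List.mem_cons.mp hmem with heq | hmem'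
    · have hz : (t.map (fun p => if p.1 = k then f p.2 else 0)).sum = 0 := by
        apply List.sum_eq_zero
        intro x hx
        obtain ⟨p, hp, rfl⟩ := List.mem_map.mp hx
        have hne : p.1 ≠ k := fun hpk => hnd.1 ⟨p, hp, by rw [← heq]; exact hpk⟩
        simp [hne]
      rw [hz, ← heq]
      simp
    · have hak : a.1 ≠ k := fun h => hnd.1 ⟨(k, c), hmem', by simp [h]⟩
      rw [if_neg hak, ih c hnd.2 hmem']
      simp

theorem pvSetUpdate_subset {α : Type} [BEq α] [LawfulBEq α] :
    ∀ (l : List α) (s : PySem.Set α), (∀ x ∈ l, x ∈ s) → PySem.Set.update s l = s := by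
  intro l
  induction l with
  | nil => intro s _; rfl
  | cons a t ih =>
    intro s h
    have ha : PySem.Set.add s a = s := by
      simp [PySem.Set.add, PySem.Set.contains, h a (List.mem_cons_self)]
    simp only [PySem.Set.update, List.foldl_cons, ha]
    exact ih s (fun x hx => h x (List.mem_cons_of_mem _ hx))

-- getD of the all-zero counter initialisation
theorem pvCounts0_getD (k : Int) : ∀ (keys : List Int) (d : PySem.Dict Int Int), d.getD k 0 = 0 →
    (keys.foldl (fun d k => d.insert k (0 : Int)) d).getD k 0 = 0 := by
  intro keys
  induction keys with
  | nil => intro d h; exact h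
  | cons a t ih =>
    intro d h
    simp only [List.foldl_cons]
    exact ih _ (by rw [PySem.Dict.getD_insert]; split <;> simp [h])

-- Σ_{v ∈ S} count v c = countP (· ∈ S) c for Nodup S
theorem pvSumCount : ∀ (c S : List Int), S.Nodup →
    (S.map (fun v => c.count v)).sum = c.countP (fun i => decide (i ∈ S)) := by
  intro c
  induction c with
  | nil => intro S _; simp
  | cons a t ih =>
    intro S hS
    have h1 : S.map (fun v => (a :: t).count v)
        = S.map (fun v => t.count v + if v = a then 1 else 0) := by
      apply List.map_congr_left
      intro v _
      rw [List.count_cons]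
      by_cases hva : v = a
      · simp [hva]
      · simp [hva, Ne.symm hva]
    rw [h1, List.sum_map_add, ih S hS, List.countP_cons]
    have h2 : ∀ (S : List Int), S.Nodup → (S.map (fun v => if v = a then 1 else 0)).sum = if a ∈ S then 1 else 0 := by
      intro S
      induction S with
      | nil => simp
      | cons s S' ihS =>
        intro hnd
        simp only [List.nodup_cons] at hnd
        simp only [List.map_cons, List.sum_cons, ihS hnd.2, List.mem_cons]
        by_cases hsa : s = a
        · subst hsa
          simp [hnd.1]
        · simp [hsa, Ne.symm hsa]
    rw [h2 S hS]
    by_cases hmem : a ∈ S <;> simp [hmem]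

-- A = B on every input where A returns (core equivalence)
theorem pvMainEq (solution : List (String × Int)) (matrix : List (List Int)) (clusters : List (Int × List Int))
    (hpre : ∀ p ∈ (PySem.Dict.ofList solution).items, p.2 = 1 → (pvParse? p.1).isSome = true) :
    verify_solution_gtsp solution matrix clusters = verify_solution_gtsp_alt solution matrix clusters := by
  have hsel : ∀ x ∈ ((PySem.Dict.ofList solution).items.filter (fun p => p.2 == 1)).map (fun p => p.1),
      (pvParse? x).isSome = true := by
    intro x hx
    obtain ⟨p, hp, rfl⟩ := List.mem_map.mp hx
    have := List.mem_filter.mp hp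
    exact hpre p this.1 (by simpa using this.2)
  obtain ⟨parsed, hparsed⟩ := pvMapM_isSome pvParse? _ hsel
  obtain ⟨hfst, hlen⟩ := pvMapM_fst _ parsed hparsed
  simp only [verify_solution_gtsp, verify_solution_gtsp_alt]
  rw [hparsed, hfst]
  -- abbreviations
  set cd := PySem.Dict.ofList clusters with hcdDef
  have hcdnd : cd.keys.Nodup := PySem.Dict.nodup_keys_ofList clusters
  set nodes : PySem.Set Int := PySem.Set.ofList (parsed.map Prod.fst) with hnodesDef
  have hnodesnd : List.Nodup nodes := PySem.Set.nodup_ofList _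
  set ss := (PySem.List.sorted parsed (fun p => p.2) false).map (fun p => p.1) with hssDef
  have hssmem : ∀ i : Int, (i ∈ ss) ↔ (i ∈ nodes) := by
    intro i
    rw [hnodesDef, PySem.Set.mem_ofList]
    exact ((PySem.List.sorted_perm parsed (fun p => p.2) false).map (fun p => p.1)).mem_iff
  -- the index
  set pairs := cd.items.flatMap (fun p => p.2.map (fun i => (i, p.1))) with hpairsDef
  set idx := cd.items.foldl (fun d p => p.2.foldl (fun d i => d.modify i [] (fun l => l ++ [p.1])) d)
      (PySem.Dict.empty : PySem.Dict Int (List Int)) with hidxDef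
  have hIdxGet : ∀ v : Int, idx.getD v [] = (pairs.filter (fun q => q.1 == v)).map (fun q => q.2) := by
    intro v
    rw [hidxDef, pvIdxFlat, PySem.Dict.getD_foldl_modify_append]
    rw [PySem.Dict.getD_empty, List.nil_append, hpairsDef]
  set counts0 := cd.keys.foldl (fun d k => d.insert k (0 : Int)) PySem.Dict.empty with hc0Def
  set counts := nodes.foldl (fun d v => (idx.getD v []).foldl (fun d k => d.modify k 0 (fun n => n + 1)) d) counts0 with hcountsDef
  set bigList := nodes.flatMap (fun v => idx.getD v []) with hblDef
  have hCounts : counts = bigList.foldl (fun d k => d.modify k 0 (fun n => n + 1)) counts0 := by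
    rw [hcountsDef, pvCntFlat]
  have hblsub : ∀ x ∈ bigList, x ∈ cd.keys := by
    intro x hx
    rw [hblDef] at hx
    obtain ⟨v, _, hxv⟩ := List.mem_flatMap.mp hx
    rw [hIdxGet] at hxv
    obtain ⟨q, hq, rfl⟩ := List.mem_map.mp hxv
    have hq' : q ∈ pairs := (List.mem_filter.mp hq).1
    rw [hpairsDef] at hq'
    obtain ⟨p, hp, hqp⟩ := List.mem_flatMap.mp hq'
    obtain ⟨i, _, rfl⟩ := List.mem_map.mp hqp
    exact List.mem_map.mpr ⟨p, hp, rfl⟩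
  have hgetD : ∀ k : Int, counts.getD k 0 = (bigList.count k : Int) := by
    intro k
    rw [hCounts, PySem.Dict.getD_foldl_modify_add_one, pvCounts0_getD k cd.keys PySem.Dict.empty (by simp [PySem.Dict.getD_empty])]
    ring
  have hkeys0 : counts0.keys = cd.keys := by
    rw [hc0Def, PySem.Dict.keys_foldl_insert, PySem.Dict.keys_empty]
    exact PySem.Set.ofList_eq_self_of_nodup cd.keys hcdnd
  have hkeys : counts.keys = cd.keys := by
    rw [hCounts, PySem.Dict.keys_foldl_modify, hkeys0]
    exact pvSetUpdate_subset bigList cd.keys hblsub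
  -- per-key count equality
  have hperkey : ∀ k ∈ cd.keys, ∀ c : List Int, (k, c) ∈ cd.items →
      bigList.count k = c.countP (fun i => decide (i ∈ nodes)) := by
    intro k hk c hkc
    have h1 : bigList.count k = (nodes.map (fun v => (idx.getD v []).count k)).sum := by
      rw [hblDef, List.count_eq_countP, List.flatMap_def, List.countP_flatten, List.map_map]
      simp only [Function.comp_def, List.count_eq_countP]
    have h2 : ∀ v : Int, (idx.getD v []).count k = c.count v := by
      intro v
      rw [hIdxGet, List.count_eq_countP, List.countP_map, List.countP_filter, hpairsDef,
        List.flatMap_def, List.countP_flatten, List.map_map]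
      refine Eq.trans (congrArg List.sum (List.map_congr_left ?_))
        (pvSumPick k (fun c => c.count v) cd.items c hcdnd hkc)
      intro p _
      simp only [Function.comp_apply, List.countP_map]
      by_cases hpk : p.1 = k
      · simp only [hpk, if_pos rfl]
        rw [List.count_eq_countP]
        apply List.countP_congr
        intro i _
        simp [hpk]
      · simp only [if_neg hpk]
        rw [List.countP_eq_zero]
        intro i _
        simp [hpk]
    calc bigList.count k = (nodes.map (fun v => c.count v)).sum := by
          rw [h1]; exact congrArg List.sum (List.map_congr_left (fun v _ => h2 v))
      _ = c.countP (fun i => decide (i ∈ nodes)) := pvSumCount c nodes hnodesnd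
  -- A's loop = B's counts check
  have hLoop : pvLoopA ss cd.values = counts.values.all (fun c => c == 1) := by
    rw [pvLoopA_eq_all, PySem.Dict.values_eq_map_keys cd hcdnd [],
      PySem.Dict.values_eq_map_keys counts (hkeys ▸ hcdnd) 0, hkeys, List.all_map, List.all_map]
    apply pvAllCongr
    intro k hk
    obtain ⟨p, hp, hpk⟩ := List.mem_map.mp hk
    have hitem : (k, p.2) ∈ cd.items := by rw [← hpk]; exact hp
    have hgd : cd.getD k [] = p.2 := PySem.Dict.getD_of_mem_items cd hitem hcdnd []
    have hA : pvCountA ss (cd.getD k []) = ((cd.getD k []).countP (fun i => decide (i ∈ nodes)) : Int) := by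
      unfold pvCountA
      rw [PySem.List.foldl_if_add_one]
      have : List.countP (fun i => ss.contains i) (cd.getD k []) = List.countP (fun i => decide (i ∈ nodes)) (cd.getD k []) := by
        apply List.countP_congr
        intro i _
        simp [List.contains_eq_mem, hssmem i]
      rw [this]; ring
    have hB : counts.getD k 0 = ((cd.getD k []).countP (fun i => decide (i ∈ nodes)) : Int) := by
      rw [hgetD, hperkey k hk p.2 hitem, hgd]
    simp only [Function.comp]
    rw [hA, hB, hgd]
  -- final assembly (re-state hLoop with the set-variables unfolded, definally equal)
  have hLoop' : pvLoopA (List.map (fun p => p.1) (PySem.List.sorted parsed fun p => p.2)) cd.values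
      = (List.foldl (fun d v => List.foldl (fun d k => d.modify k 0 fun n => n + 1) d (idx.getD v []))
          counts0 (PySem.Set.ofList (List.map Prod.fst parsed))).values.all (fun c => c == 1) := hLoop
  simp only [hLoop', hlen]
  generalize ((List.foldl (fun d v => List.foldl (fun d k => d.modify k 0 fun n => n + 1) d (idx.getD v []))
      counts0 (PySem.Set.ofList (List.map Prod.fst parsed))).values.all (fun c => c == 1)) = b
  generalize (List.map (fun p => p.1) (List.filter (fun p => p.2 == 1) (PySem.Dict.ofList solution).items)).length = n
  generalize cd.keys.length = m
  by_cases h : n = m <;> cases b <;> simp [h]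

-- ===== VERDICT (by name: the statement is the Claim_ definition above) =====
theorem verify_solution_gtsp_spec : Claim_equal_verify_solution_gtsp := by
  intro solution matrix clusters _ hpre
  exact pvMainEq solution matrix clusters hpre
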